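-- pv_equiv track=rewrite | github.com/sammy0329/DataStructures_Study | ryan_season2/pro_42626.py | solution
-- ===== SOURCE A (Python) =====
-- import heapq
--
-- def solution(scoville, K):
--     heap = scoville
--     heapq.heapify(heap)
--
--     answer = 0
--     while heap[0] < K:
--         if len(heap) == 1:
--             return -1
--
--         answer += 1
--         lower_1st = heapq.heappop(heap)
--         lower_2nd = heapq.heappop(heap)
--
--         new = lower_1st + 2*lower_2nd
--
--         heapq.heappush(heap, new)
--
--     return answer
-- ===== SOURCE B (Python) =====
-- def solution(scoville, K):
--     # Two-queue technique: sort the originals once; mixes are created in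
--     # nondecreasing order, so a plain FIFO list holds them sorted.  The two
--     # smallest remaining values are always among the two queue fronts, so each
--     # round is O(1) -- no heap and no reinsertion.  (A mutates scoville in
--     # place; B does not -- return values agree.)
--     base = sorted(scoville)
--     made = []
--     i = 0
--     j = 0
--     answer = 0
--
--     def take():
--         nonlocal i, j
--         if i < len(base) and (j >= len(made) or base[i] <= made[j]):
--             i += 1
--             return base[i - 1]
--         j += 1
--         return made[j - 1]
--
--     while True:
--         if i < len(base) and (j >= len(made) or base[i] <= made[j]):
--             cur = base[i]
--         else:
--             cur = made[j]
--         if cur >= K: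
--             return answer
--         if (len(base) - i) + (len(made) - j) == 1:
--             return -1
--         answer += 1
--         a = take()
--         b = take()
--         made.append(a + 2 * b)
-- ===== Notes on version B (the rewrite author's own statement) =====
-- stated objective: faster
-- what changed: Replaces the binary heap by the classic two-queue technique: sort the input once, keep newly created mixes in a FIFO queue (they are provably created in nondecreasing order, even for negative inputs), and take the two smallest values from the two queue fronts, so each round is O(1) queue-front work with no heap operations and no reinsertion.
import Mathlib
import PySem

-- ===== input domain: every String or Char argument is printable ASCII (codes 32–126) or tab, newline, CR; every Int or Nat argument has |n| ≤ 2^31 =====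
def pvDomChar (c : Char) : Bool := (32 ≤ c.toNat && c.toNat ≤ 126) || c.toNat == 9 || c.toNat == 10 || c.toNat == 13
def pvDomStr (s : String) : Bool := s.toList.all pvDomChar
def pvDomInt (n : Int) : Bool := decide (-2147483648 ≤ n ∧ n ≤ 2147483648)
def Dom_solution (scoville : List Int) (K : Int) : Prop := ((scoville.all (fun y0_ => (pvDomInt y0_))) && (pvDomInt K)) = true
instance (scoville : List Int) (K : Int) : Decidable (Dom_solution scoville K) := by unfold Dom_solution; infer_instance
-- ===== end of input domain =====

-- B replaces A's heap by the two-queue technique (sorted base + FIFO of mixes);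
-- A mutates `scoville` in place, B does not — the equivalence proved here is
-- about the RETURN value only.

-- ===== PORT A =====
-- A's heap lives in the heapq library; it is ported contract-level as a
-- mergeable binary min-heap (same multiset, minimum at the root, pop returns
-- the minimum), exact for every value A reads from it (heap[0], len, pops).
inductive PHeap : Type
  | nil : PHeap
  | node : Int → PHeap → PHeap → PHeap
deriving DecidableEq, Repr

def PHeap.merge : PHeap → PHeap → PHeap
  | .nil, h => h
  | h, .nil => h
  | .node v1 a1 b1, .node v2 a2 b2 =>
    if v1 ≤ v2 then .node v1 (PHeap.merge b1 (.node v2 a2 b2)) a1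
    else .node v2 (PHeap.merge (.node v1 a1 b1) b2) a2
termination_by h1 h2 => sizeOf h1 + sizeOf h2
decreasing_by all_goals (simp; try omega)

def PHeap.insert (x : Int) (h : PHeap) : PHeap := PHeap.merge (.node x .nil .nil) h

def PHeap.size : PHeap → Nat
  | .nil => 0
  | .node _ a b => 1 + a.size + b.size

-- heapq.heapify ported as building the heap by insertion (same contract)
def heapifyA (xs : List Int) : PHeap := xs.foldl (fun h x => PHeap.insert x h) .nil

-- the while loop; fuel = scoville.length suffices since each round removes one
-- element; heap[0] on the empty heap raises in Python (excluded by Pre_)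
def solutionLoopA (K : Int) : Nat → PHeap → Int → Int
  | 0, _, ans => ans
  | _+1, .nil, _ => 0          -- heap[0] IndexError (outside Pre_, unreachable later)
  | fuel+1, .node v a b, ans =>
    if v < K then
      if (PHeap.node v a b).size = 1 then -1
      else
        match PHeap.merge a b with
        | .nil => 0              -- unreachable: size ≥ 2 here
        | .node v2 a2 b2 =>
          solutionLoopA K fuel (PHeap.insert (v + 2 * v2) (PHeap.merge a2 b2)) (ans + 1)
    else ans

def solution (scoville : List Int) (K : Int) : Int :=
  solutionLoopA K scoville.length (heapifyA scoville) 0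

-- ===== PORT B =====
-- Source B's `take()`: pop the overall smallest of the two queue fronts; the index
-- pair (i, j) into the fixed Python lists is ported as the remaining suffixes.
def takeB : List Int → List Int → Int × List Int × List Int
  | x :: bs, [] => (x, bs, [])
  | x :: bs, m :: ms => if x ≤ m then (x, bs, m :: ms) else (m, x :: bs, ms)
  | [], m :: ms => (m, [], ms)
  | [], [] => (0, [], [])      -- made[j] IndexError (outside Pre_, unreachable later)

def solutionLoopB (K : Int) : Nat → List Int → List Int → Int → Int
  | 0, _, _, ans => ans
  | _+1, [], [], _ => 0        -- made[j] IndexError (outside Pre_, unreachable later)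
  | fuel+1, base, made, ans =>
    let p := takeB base made   -- p.1 = cur (peek: the smaller front)
    if p.1 < K then
      if base.length + made.length = 1 then -1
      else
        let q := takeB p.2.1 p.2.2
        solutionLoopB K fuel q.2.1 (q.2.2 ++ [p.1 + 2 * q.1]) (ans + 1)
    else ans

def solution_alt (scoville : List Int) (K : Int) : Int :=
  solutionLoopB K scoville.length (PySem.List.sorted scoville (fun x => x) false) [] 0

-- ===== PRECONDITION & SPEC =====
-- Pre_ excludes only the empty list, on which A raises IndexError (heap[0]).
def Pre_solution (scoville : List Int) (K : Int) : Prop := scoville ≠ []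
instance (scoville : List Int) (K : Int) : Decidable (Pre_solution scoville K) := by
  unfold Pre_solution; infer_instance

def pvWitness_solution : List Int × Int := ([1, 2, 3, 9, 10, 12], 7)

def Spec_solution (scoville : List Int) (K : Int) (out : Int) : Prop := out = solution_alt scoville K
instance (scoville : List Int) (K : Int) (out : Int) : Decidable (Spec_solution scoville K out) := by
  unfold Spec_solution; infer_instance

-- ===== CLAIM (what is proved, stated in full; the proofs are below) =====
def Claim_equal_solution : Prop := ∀ (scoville : List Int) (K : Int), Dom_solution scoville K → Pre_solution scoville K → Spec_solution scoville K (solution scoville K)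

-- ===== LEMMAS AND PROOFS =====
def PHeap.toList : PHeap → List Int
  | .nil => []
  | .node v a b => v :: (a.toList ++ b.toList)

def PHeap.Inv : PHeap → Prop
  | .nil => True
  | .node v a b => (∀ x ∈ (PHeap.node v a b).toList, v ≤ x) ∧ a.Inv ∧ b.Inv

theorem PHeap.toList_merge_perm (h1 h2 : PHeap) :
    (PHeap.merge h1 h2).toList.Perm (h1.toList ++ h2.toList) := by
  induction h1, h2 using PHeap.merge.induct with
  | case1 h => simp [PHeap.merge, PHeap.toList]
  | case2 h hne => cases h <;> simp [PHeap.merge, PHeap.toList]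
  | case3 v1 a1 b1 v2 a2 b2 hle ih =>
      simp only [PHeap.merge, if_pos hle, PHeap.toList]
      refine List.Perm.cons _ ?_
      have p2 : ((b1.toList ++ (PHeap.node v2 a2 b2).toList) ++ a1.toList).Perm
          ((a1.toList ++ b1.toList) ++ (PHeap.node v2 a2 b2).toList) := by
        rw [List.append_assoc a1.toList]; exact List.perm_append_comm
      exact ((ih.append_right _).trans p2).trans (by simp [PHeap.toList])
  | case4 v1 a1 b1 v2 a2 b2 hle ih =>
      simp only [PHeap.merge, if_neg hle, PHeap.toList]
      have p3 : (((v1 :: (a1.toList ++ b1.toList)) ++ b2.toList) ++ a2.toList).Perm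
          ((v1 :: (a1.toList ++ b1.toList)) ++ (a2.toList ++ b2.toList)) := by
        rw [List.append_assoc]; exact List.Perm.append_left _ List.perm_append_comm
      have step1 := (ih.append_right a2.toList).cons v2
      simp only [PHeap.toList] at step1
      exact (step1.trans (p3.cons v2)).trans List.perm_middle.symm

theorem PHeap.merge_inv {h1 h2 : PHeap} (i1 : h1.Inv) (i2 : h2.Inv) :
    (PHeap.merge h1 h2).Inv := by
  induction h1, h2 using PHeap.merge.induct with
  | case1 h => simpa [PHeap.merge]
  | case2 h hne => cases h <;> simp_all [PHeap.merge]
  | case3 v1 a1 b1 v2 a2 b2 hle ih =>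
      simp only [PHeap.Inv] at i1 i2
      obtain ⟨ub1, ia1, ib1⟩ := i1
      simp only [PHeap.merge, if_pos hle, PHeap.Inv]
      refine ⟨?_, ih ib1 (by simp only [PHeap.Inv]; exact i2), ia1⟩
      intro x hx
      simp only [PHeap.toList, List.mem_cons, List.mem_append] at hx
      rcases hx with rfl | hx | hx
      · exact le_refl _
      · rcases List.mem_append.mp
            ((PHeap.toList_merge_perm b1 (.node v2 a2 b2)).mem_iff.mp hx) with h | h
        · exact ub1 _ (by simp [PHeap.toList]; tauto)
        · exact le_trans hle (i2.1 _ h)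
      · exact ub1 _ (by simp [PHeap.toList]; tauto)
  | case4 v1 a1 b1 v2 a2 b2 hle ih =>
      simp only [PHeap.Inv] at i1 i2
      obtain ⟨ub2, ia2, ib2⟩ := i2
      have hlt : v2 ≤ v1 := (not_le.mp hle).le
      simp only [PHeap.merge, if_neg hle, PHeap.Inv]
      refine ⟨?_, ih (by simp only [PHeap.Inv]; exact i1) ib2, ia2⟩
      intro x hx
      simp only [PHeap.toList, List.mem_cons, List.mem_append] at hx
      rcases hx with rfl | hx | hx
      · exact le_refl _
      · rcases List.mem_append.mp
            ((PHeap.toList_merge_perm (.node v1 a1 b1) b2).mem_iff.mp hx) with h | h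
        · exact le_trans hlt (i1.1 _ h)
        · exact ub2 _ (by simp [PHeap.toList]; tauto)
      · exact ub2 _ (by simp [PHeap.toList]; tauto)

theorem PHeap.root_min {v : Int} {a b : PHeap} (h : (PHeap.node v a b).Inv) :
    ∀ x ∈ (PHeap.node v a b).toList, v ≤ x := by
  simp only [PHeap.Inv] at h; exact h.1

theorem PHeap.size_eq_length (h : PHeap) : h.size = h.toList.length := by
  induction h with
  | nil => rfl
  | node v a b iha ihb => simp [PHeap.size, PHeap.toList, iha, ihb]; omega

theorem PHeap.toList_insert_perm (x : Int) (h : PHeap) :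
    (PHeap.insert x h).toList.Perm (x :: h.toList) := by
  simpa [PHeap.toList, PHeap.insert] using PHeap.toList_merge_perm (.node x .nil .nil) h

theorem PHeap.insert_inv {h : PHeap} (i : h.Inv) (x : Int) : (PHeap.insert x h).Inv :=
  PHeap.merge_inv (by simp [PHeap.Inv, PHeap.toList]) i

theorem heapifyA_perm_inv (xs : List Int) :
    (heapifyA xs).toList.Perm xs ∧ (heapifyA xs).Inv := by
  suffices H : ∀ (xs : List Int) (h : PHeap), h.Inv →
      (xs.foldl (fun h x => PHeap.insert x h) h).toList.Perm (h.toList ++ xs) ∧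
      (xs.foldl (fun h x => PHeap.insert x h) h).Inv by
    have := H xs .nil (by simp [PHeap.Inv])
    simpa [heapifyA, PHeap.toList] using this
  intro xs
  induction xs with
  | nil => intro h hi; exact ⟨by simp, hi⟩
  | cons x xs ih =>
      intro h hi
      obtain ⟨p, i⟩ := ih (PHeap.insert x h) (PHeap.insert_inv hi x)
      refine ⟨p.trans ?_, i⟩
      have s1 : ((PHeap.insert x h).toList ++ xs).Perm ((x :: h.toList) ++ xs) :=
        (PHeap.toList_insert_perm x h).append_right _
      exact s1.trans (by rw [List.cons_append]; exact List.perm_middle.symm)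

-- ----- B-side lemmas: takeB pops the overall minimum of the two sorted queues -----
theorem takeB_shape (base made : List Int) (hne : ¬(base = [] ∧ made = [])) :
    (base = (takeB base made).1 :: (takeB base made).2.1 ∧ (takeB base made).2.2 = made) ∨
    (made = (takeB base made).1 :: (takeB base made).2.2 ∧ (takeB base made).2.1 = base) := by
  match base, made with
  | [], [] => exact absurd ⟨rfl, rfl⟩ hne
  | x :: bs, [] => exact Or.inl ⟨rfl, rfl⟩
  | [], m :: ms => exact Or.inr ⟨rfl, rfl⟩
  | x :: bs, m :: ms =>
      by_cases h : x ≤ m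
      · exact Or.inl (by simp [takeB, h])
      · exact Or.inr (by simp [takeB, h])

theorem takeB_min (base made : List Int) (hb : base.Pairwise (· ≤ ·))
    (hm : made.Pairwise (· ≤ ·)) :
    ∀ x ∈ base ++ made, (takeB base made).1 ≤ x := by
  match base, made with
  | [], [] => simp
  | x :: bs, [] =>
      intro y hy
      simp only [takeB, List.append_nil, List.mem_cons] at hy ⊢
      rcases hy with rfl | hy
      · exact le_refl _
      · exact (List.pairwise_cons.mp hb).1 y hy
  | [], m :: ms =>
      intro y hy
      simp only [takeB, List.nil_append, List.mem_cons] at hy ⊢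
      rcases hy with rfl | hy
      · exact le_refl _
      · exact (List.pairwise_cons.mp hm).1 y hy
  | x :: bs, m :: ms =>
      intro y hy
      simp only [List.mem_append, List.mem_cons] at hy
      by_cases h : x ≤ m
      · simp only [takeB, if_pos h]
        rcases hy with (rfl | hy) | (rfl | hy)
        · exact le_refl _
        · exact (List.pairwise_cons.mp hb).1 y hy
        · exact h
        · exact h.trans ((List.pairwise_cons.mp hm).1 y hy)
      · simp only [takeB, if_neg h]
        have hmx : m ≤ x := (not_le.mp h).le
        rcases hy with (rfl | hy) | (rfl | hy)
        · exact hmx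
        · exact hmx.trans ((List.pairwise_cons.mp hb).1 y hy)
        · exact le_refl _
        · exact (List.pairwise_cons.mp hm).1 y hy

theorem takeB_perm (base made : List Int) (hne : ¬(base = [] ∧ made = [])) :
    ((takeB base made).1 :: ((takeB base made).2.1 ++ (takeB base made).2.2)).Perm
      (base ++ made) := by
  rcases takeB_shape base made hne with ⟨hbase, h2⟩ | ⟨hmade, h1⟩
  · rw [h2]
    conv_rhs => rw [hbase]
    exact List.Perm.rfl
  · rw [h1]
    conv_rhs => rw [hmade]
    exact List.perm_middle.symm

-- head of a proper (non-last) position of `init ++ [L]` lies in `init`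
theorem suffix_head_mem (init : List Int) (L c : Int) (s : List Int)
    (hsuf : (c :: s) <:+ init ++ [L]) (hs : s ≠ []) : c ∈ init := by
  obtain ⟨pre, hpre⟩ := hsuf
  obtain ⟨s', ls, rfl⟩ := List.eq_nil_or_concat s |>.resolve_left hs
  have h2 : (pre ++ c :: s') ++ [ls] = init ++ [L] := by
    simpa [List.concat_eq_append] using hpre
  have h3 : pre ++ c :: s' = init := (List.append_inj' h2 rfl).1
  rw [← h3]; simp

-- invariant: `made` ends in its newest mix L, and L ≤ 3t where t bounds every
-- other remaining element from below
def MInv (base made : List Int) : Prop :=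
  made = [] ∨ ∃ init L t, made = init ++ [L] ∧ L ≤ 3 * t ∧ ∀ x ∈ base ++ init, t ≤ x

theorem min_unique {l1 l2 : List Int} {u v : Int} (hp : l1.Perm l2)
    (hu : u ∈ l1) (hv : v ∈ l2) (hu0 : ∀ x ∈ l1, u ≤ x) (hv0 : ∀ x ∈ l2, v ≤ x) :
    u = v :=
  le_antisymm (hu0 v (hp.mem_iff.mpr hv)) (hv0 u (hp.mem_iff.mp hu))

theorem last_ub {init : List Int} {L : Int}
    (hsm : (init ++ [L]).Pairwise (· ≤ ·)) : ∀ x ∈ init ++ [L], x ≤ L := by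
  intro x hx
  rcases List.mem_append.mp hx with hx | hx
  · exact (List.pairwise_append.mp hsm).2.2 x hx L (by simp)
  · simp at hx; simp [hx]

theorem loop_eq (K : Int) (fuel : Nat) :
    ∀ (h : PHeap) (base made : List Int) (ans : Int),
      h.toList.Perm (base ++ made) →
      base.Pairwise (· ≤ ·) → made.Pairwise (· ≤ ·) →
      MInv base made → h.Inv →
      solutionLoopA K fuel h ans = solutionLoopB K fuel base made ans := by
  induction fuel with
  | zero => intro h base made ans _ _ _ _ _; rfl
  | succ fuel ih =>
      intro h base made ans hp hsb hsm hmi hi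
      cases h with
      | nil =>
          simp only [PHeap.toList] at hp
          have h0 : base ++ made = [] := hp.symm.eq_nil
          have hb0 : base = [] := by cases base <;> simp_all
          have hm0 : made = [] := by cases made <;> simp_all
          subst hb0; subst hm0; rfl
      | node v a b =>
          have hne : ¬(base = [] ∧ made = []) := by
            rintro ⟨rfl, rfl⟩
            have := hp.eq_nil
            simp [PHeap.toList] at this
          have hBeq : solutionLoopB K (fuel+1) base made ans =
              (if (takeB base made).1 < K then
                 if base.length + made.length = 1 then -1
                 else
                   solutionLoopB K fuel (takeB (takeB base made).2.1 (takeB base made).2.2).2.1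
                     ((takeB (takeB base made).2.1 (takeB base made).2.2).2.2 ++
                       [(takeB base made).1 + 2 * (takeB (takeB base made).2.1 (takeB base made).2.2).1])
                     (ans + 1)
               else ans) := by
            match base, made with
            | [], [] => exact absurd ⟨rfl, rfl⟩ hne
            | x :: bs, mm => rfl
            | [], m :: ms => rfl
          rw [hBeq]
          obtain ⟨c1, b1, m1, hq1⟩ : ∃ c bb m, takeB base made = (c, bb, m) := ⟨_, _, _, rfl⟩
          have hshape1 := takeB_shape base made hne
          have hmin1 := takeB_min base made hsb hsm
          have hperm1 := takeB_perm base made hne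
          rw [hq1] at hshape1 hmin1 hperm1
          simp only at hshape1 hmin1 hperm1
          rw [hq1]; simp only
          -- c1 is A's heap minimum v
          have hpl : (PHeap.node v a b).toList = v :: (a.toList ++ b.toList) := rfl
          have hvc : v = c1 := by
            refine min_unique hp (by simp [PHeap.toList]) ?_ (PHeap.root_min hi) hmin1
            exact hperm1.mem_iff.mp (List.mem_cons_self)
          by_cases hK : v < K
          · rw [← hvc]
            simp only [solutionLoopA, if_pos hK]
            have hlen : (PHeap.node v a b).size = base.length + made.length := by
              rw [PHeap.size_eq_length, hp.length_eq]; simp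
            by_cases hsz : base.length + made.length = 1
            · simp [hlen, hsz]
            · simp only [if_neg hsz, hlen]
              -- merge a b is nonempty
              have htot : (base ++ made).length = base.length + made.length := by simp
              have hab : a.toList.length + b.toList.length + 1 = base.length + made.length := by
                have := hp.length_eq
                simp [PHeap.toList] at this
                omega
              have hmerge := PHeap.toList_merge_perm a b
              cases hm : PHeap.merge a b with
              | nil =>
                  exfalso
                  rw [hm] at hmerge
                  have h0 : a.toList ++ b.toList = [] := hmerge.symm.eq_nil
                  have h0' : a.toList.length + b.toList.length = 0 := by
                    rw [← List.length_append, h0]; rfl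
                  omega
              | node v2 a2 b2 =>
                  -- second take
                  obtain ⟨c2, b2q, m2, hq2⟩ : ∃ c bb m, takeB b1 m1 = (c, bb, m) := ⟨_, _, _, rfl⟩
                  have hsb1 : b1.Pairwise (· ≤ ·) := by
                    rcases hshape1 with ⟨hbase, h2⟩ | ⟨hmade, h1⟩
                    · rw [hbase] at hsb; exact hsb.of_cons
                    · rw [h1]; exact hsb
                  have hsm1 : m1.Pairwise (· ≤ ·) := by
                    rcases hshape1 with ⟨hbase, h2⟩ | ⟨hmade, h1⟩
                    · rw [h2]; exact hsm
                    · rw [hmade] at hsm; exact hsm.of_cons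
                  have hne2 : ¬(b1 = [] ∧ m1 = []) := by
                    rintro ⟨rfl, rfl⟩
                    have := hperm1.length_eq
                    simp at this
                    omega
                  have hshape2 := takeB_shape b1 m1 hne2
                  have hmin2 := takeB_min b1 m1 hsb1 hsm1
                  have hperm2 := takeB_perm b1 m1 hne2
                  rw [hq2] at hshape2 hmin2 hperm2
                  simp only at hshape2 hmin2 hperm2
                  rw [hq2]; simp only
                  -- multiset of the rest agrees
                  have hrest : (a.toList ++ b.toList).Perm (b1 ++ m1) := by
                    have hh : (v :: (a.toList ++ b.toList)).Perm (c1 :: (b1 ++ m1)) := by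
                      rw [← hpl]
                      exact hp.trans hperm1.symm
                    rw [hvc] at hh
                    exact hh.cons_inv
                  have hmp : (PHeap.node v2 a2 b2).toList.Perm (b1 ++ m1) := by
                    rw [← hm]; exact hmerge.trans hrest
                  have hinvm : (PHeap.node v2 a2 b2).Inv := by
                    rw [← hm]
                    have hi0 := hi
                    simp only [PHeap.Inv] at hi0
                    exact PHeap.merge_inv hi0.2.1 hi0.2.2
                  have hv2c : v2 = c2 := by
                    refine min_unique hmp (by simp [PHeap.toList]) ?_ (PHeap.root_min hinvm) hmin2
                    exact hperm2.mem_iff.mp (List.mem_cons_self)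
                  rw [← hv2c]
                  -- memberships for bounds
                  have hc2mem : c2 ∈ base ++ made := by
                    refine hperm1.mem_iff.mp (List.mem_cons_of_mem _ ?_)
                    exact hperm2.mem_iff.mp (List.mem_cons_self)
                  have hc1le2 : c1 ≤ c2 := hmin1 c2 hc2mem
                  -- apply the induction hypothesis
                  apply ih
                  · -- permutation
                    have p1 := PHeap.toList_insert_perm (v + 2 * v2) (PHeap.merge a2 b2)
                    have p2 := PHeap.toList_merge_perm a2 b2
                    have p3 : (a2.toList ++ b2.toList).Perm (b2q ++ m2) := by
                      have hh : (v2 :: (a2.toList ++ b2.toList)).Perm (v2 :: (b2q ++ m2)) := by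
                        have h' := hmp.trans hperm2.symm
                        rw [← hv2c] at h'
                        simpa [PHeap.toList] using h'
                      exact hh.cons_inv
                    have p4 : (b2q ++ (m2 ++ [v + 2 * v2])).Perm ((v + 2 * v2) :: (b2q ++ m2)) := by
                      rw [← List.append_assoc]
                      exact List.perm_append_singleton _ _
                    exact (p1.trans ((p2.trans p3).cons _)).trans p4.symm
                  · -- b2q sorted
                    rcases hshape2 with ⟨hb1, h2⟩ | ⟨hm1, h1⟩
                    · rw [hb1] at hsb1; exact hsb1.of_cons
                    · rw [h1]; exact hsb1
                  · -- m2 ++ [new] sorted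
                    rw [List.pairwise_append]
                    refine ⟨?_, by simp, ?_⟩
                    · rcases hshape2 with ⟨hb1, h2⟩ | ⟨hm1, h1⟩
                      · rw [h2]; exact hsm1
                      · rw [hm1] at hsm1; exact hsm1.of_cons
                    · intro x hx y hy
                      simp only [List.mem_singleton] at hy
                      subst hy
                      rw [hvc, hv2c]
                      have hm2ne : m2 ≠ [] := by rintro rfl; simp at hx
                      have hm1ne : m1 ≠ [] := by
                        rcases hshape2 with ⟨hb1, h2⟩ | ⟨hm1eq, h1⟩
                        · rw [← h2]; exact hm2ne
                        · rw [hm1eq]; simp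
                      have hm1suf : m1 <:+ made := by
                        rcases hshape1 with ⟨hbase, h2⟩ | ⟨hmade1, h1⟩
                        · rw [h2]
                        · rw [hmade1]; exact List.suffix_cons _ _
                      rcases hmi with hmade0 | ⟨init, L, t, hmade, hLt, hlb⟩
                      · exact absurd (List.suffix_nil.mp (hmade0 ▸ hm1suf)) hm1ne
                      · have hxm1 : x ∈ m1 := by
                          rcases hshape2 with ⟨hb1, h2⟩ | ⟨hm1eq, h1⟩
                          · exact h2 ▸ hx
                          · exact hm1eq ▸ List.mem_cons_of_mem _ hx
                        have hxmade : x ∈ made := hm1suf.subset hxm1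
                        have hxL : x ≤ L := last_ub (hmade ▸ hsm) x (hmade ▸ hxmade)
                        have htc1 : t ≤ c1 := by
                          rcases hshape1 with ⟨hbase, h2⟩ | ⟨hmade1, h1⟩
                          · exact hlb c1 (List.mem_append.mpr (Or.inl
                              (hbase ▸ List.mem_cons_self)))
                          · have hsuf1 : (c1 :: m1) <:+ init ++ [L] := by
                              rw [← hmade, hmade1]
                            exact hlb c1 (List.mem_append.mpr (Or.inr
                              (suffix_head_mem init L c1 m1 hsuf1 hm1ne)))
                        have htc2 : t ≤ c2 := by
                          rcases hshape2 with ⟨hb1, h2⟩ | ⟨hm1eq, h1⟩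
                          · have hc2base : c2 ∈ base := by
                              rcases hshape1 with ⟨hbase, _⟩ | ⟨_, h1b⟩
                              · exact hbase ▸ List.mem_cons_of_mem _ (hb1 ▸ List.mem_cons_self)
                              · exact h1b ▸ (hb1 ▸ List.mem_cons_self)
                            exact hlb c2 (List.mem_append.mpr (Or.inl hc2base))
                          · have hsuf2 : (c2 :: m2) <:+ init ++ [L] := by
                              rw [← hmade, ← hm1eq]; exact hm1suf
                            exact hlb c2 (List.mem_append.mpr (Or.inr
                              (suffix_head_mem init L c2 m2 hsuf2 hm2ne)))
                        linarith
                  · -- MInv for the next state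
                    refine Or.inr ⟨m2, v + 2 * v2, c2, rfl, by rw [hvc, hv2c]; omega, ?_⟩
                    intro x hx
                    refine hmin2 x (hperm2.mem_iff.mp (List.mem_cons_of_mem _ ?_))
                    rcases List.mem_append.mp hx with hx | hx
                    · exact List.mem_append.mpr (Or.inl hx)
                    · exact List.mem_append.mpr (Or.inr hx)
                  · -- heap invariant
                    have hinvm0 := hinvm
                    simp only [PHeap.Inv] at hinvm0
                    exact PHeap.insert_inv (PHeap.merge_inv hinvm0.2.1 hinvm0.2.2) _
          · rw [← hvc]
            simp [solutionLoopA, hK]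

-- ===== VERDICT (by name: the statement is the Claim_ definition above) =====
theorem solution_spec : Claim_equal_solution := by
  intro scoville K _ _
  unfold Spec_solution solution solution_alt
  obtain ⟨hp, hi⟩ := heapifyA_perm_inv scoville
  have hperm : (PySem.List.sorted scoville (fun x => x) false).Perm scoville :=
    PySem.List.sorted_perm scoville (fun x => x) false
  have hpw : (PySem.List.sorted scoville (fun x => x) false).Pairwise (· ≤ ·) := by
    simpa using PySem.List.sorted_pairwise (xs := scoville) (key := fun x => x)
  exact loop_eq K scoville.length _ _ [] 0 (by simpa using hp.trans hperm.symm)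
    hpw (by simp) (Or.inl rfl) hi
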